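-- pv_equiv track=rewrite | github.com/jundaf2/PDE-Net-FDTD | show_kernels.py | _less_order_m
-- ===== SOURCE A (Python) =====
-- def _inv_equal_order_m(d,m):
--     A = []
--     assert d >= 1 and m >= 0
--     if d == 1:
--         A = [[m,],]
--         return A
--     if m == 0:
--         for i in range(d):
--             A.append(0)
--         return [A,]
--     for k in range(m+1):
--         B = _inv_equal_order_m(d-1,m-k)
--         for b in B:
--             b.append(k)
--         A = A+B
--     return A
--
-- def _less_order_m(d,m):
--     A = []
--     n_e_o =[]
--     num_each_order = 0
--     for k in range(m+1):
--         num_each_order+=1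
--         B = _inv_equal_order_m(d,k)
--         for b in B:
--             b.reverse()
--         B.sort()
--         B.reverse()
--         A.append(B)
--     return A
-- ===== SOURCE B (Python) =====
-- def _less_order_m(d, m):
--     # Generate, for each total order k = 0..m, all d-tuples of nonnegative
--     # integers summing to k, directly in descending lexicographic order
--     # (first coordinate from k down to 0), so no reversing/sorting is needed.
--     def tuples(n, k):
--         if k == 0:
--             return [[0] * n]
--         if n == 1:
--             return [[k]]
--         return [[i] + rest for i in range(k, -1, -1) for rest in tuples(n - 1, k - i)]
--     return [tuples(d, k) for k in range(m + 1)]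
-- ===== Notes on version B (the rewrite author's own statement) =====
-- stated objective: simpler
-- what changed: B enumerates each order-k group directly in descending lexicographic order by recursing on the FIRST coordinate (from k down to 0, with a no-recursion all-zeros base for k=0), replacing A's recursion over the last coordinate followed by per-element reverse, sort and list reverse.
-- outside the precondition, e.g. on _less_order_m(0, 1): A raises AssertionError, B raises RecursionError; on _less_order_m(0, 0): A raises AssertionError, B returns [[[]]]
import Mathlib
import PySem

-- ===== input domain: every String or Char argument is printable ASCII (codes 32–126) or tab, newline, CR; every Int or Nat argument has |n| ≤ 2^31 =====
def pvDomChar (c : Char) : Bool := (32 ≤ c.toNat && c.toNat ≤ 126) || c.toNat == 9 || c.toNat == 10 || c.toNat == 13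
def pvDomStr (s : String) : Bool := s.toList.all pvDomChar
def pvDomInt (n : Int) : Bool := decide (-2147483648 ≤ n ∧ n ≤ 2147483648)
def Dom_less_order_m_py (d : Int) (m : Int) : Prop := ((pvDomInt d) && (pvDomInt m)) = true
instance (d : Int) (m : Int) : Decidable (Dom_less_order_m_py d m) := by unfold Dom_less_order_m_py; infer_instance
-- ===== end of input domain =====

-- B enumerates each order-k group of multi-indices directly in descending lexicographic
-- order by recursing on the first coordinate, replacing A's recursion over the last
-- coordinate followed by per-element reverse, sort and reverse (objective: simpler).


-- ===== PORT A =====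
-- Literal port of _inv_equal_order_m, recursing on the dimension as a Nat
-- (within Pre_ it is only called with d >= 1 and k >= 0, matching the assert;
-- the assert-failing case d = 0 returns [], unreachable under Pre_).
def pvInvEqual : Nat → Nat → List (List Int)
  | 0, _ => []                                     -- Python: assert d >= 1 fails (excluded by Pre_)
  | 1, m => [[(m : Int)]]
  | (d+2), m =>
    if m = 0 then
      [(List.range (d+2)).foldl (fun A _ => A ++ [(0 : Int)]) []]
    else
      (List.range (m+1)).foldl
        (fun A k => A ++ (pvInvEqual (d+1) (m-k)).map (fun b => b ++ [(k : Int)])) []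

-- A's dead variables n_e_o / num_each_order do not influence the result and are omitted;
-- B.sort() then B.reverse() is sorted-ascending then reversed.
def less_order_m_py (d : Int) (m : Int) : List (List (List Int)) :=
  (PySem.List.pyRange 0 (m+1) 1).foldl
    (fun A k =>
      A ++ [(PySem.List.sorted ((pvInvEqual d.toNat k.toNat).map List.reverse)
               (fun x => x)).reverse]) []

-- ===== PORT B =====
-- Literal port of Source B's `tuples`: all n-tuples of nonnegatives summing to k,
-- first coordinate from k down to 0 (descending lex); [0]*n for k = 0. Python B
-- hits a RecursionError for n = 0, k > 0 (excluded by Pre_); the port returns [] there.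
def pvTuples (n : Nat) (k : Int) : List (List Int) :=
  if k = 0 then [List.replicate n (0 : Int)]
  else
    match n with
    | 0 => []
    | 1 => [[k]]
    | (m+2) =>
      (PySem.List.pyRange k (-1) (-1)).flatMap
        (fun i => (pvTuples (m+1) (k-i)).map (fun rest => i :: rest))

def less_order_m_py_alt (d : Int) (m : Int) : List (List (List Int)) :=
  (PySem.List.pyRange 0 (m+1) 1).map (fun k => pvTuples d.toNat k)

-- ===== PRECONDITION & SPEC =====
-- Pre_ excludes d < 1 with m >= 0, where Python A raises AssertionError (and Python B RecursionError).
def Pre_less_order_m_py (d : Int) (m : Int) : Prop := m < 0 ∨ 1 ≤ d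
instance (d : Int) (m : Int) : Decidable (Pre_less_order_m_py d m) := by unfold Pre_less_order_m_py; infer_instance
def pvWitness_less_order_m_py : Int × Int := (2, 3)

def Spec_less_order_m_py (d : Int) (m : Int) (out : List (List (List Int))) : Prop := out = less_order_m_py_alt d m
instance (d : Int) (m : Int) (out : List (List (List Int))) : Decidable (Spec_less_order_m_py d m out) := by unfold Spec_less_order_m_py; infer_instance

-- ===== CLAIM (what is proved, stated in full; the proofs are below) =====
def Claim_equal_less_order_m_py : Prop := ∀ (d : Int) (m : Int), Dom_less_order_m_py d m → Pre_less_order_m_py d m → Spec_less_order_m_py d m (less_order_m_py d m)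

-- ===== LEMMAS AND PROOFS =====

theorem pyRange_desc (kn : Nat) :
    PySem.List.pyRange (kn : Int) (-1) (-1) = (List.range (kn+1)).map (fun j : Nat => (kn : Int) - (j : Int)) := by
  rw [PySem.List.pyRange]
  simp only [neg_neg, if_neg (show ¬((-1:Int) = 0) by norm_num),
    if_neg (show ¬((0:Int) < -1) by norm_num), if_pos (show (-1:Int) < (kn:Int) by omega)]
  have hc : (((kn : Int) - -1 + 1 - 1) / 1).toNat = kn + 1 := by omega
  rw [hc]
  apply List.map_congr_left
  intro j _
  ring

theorem pvTuples_zero (dn : Nat) :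
    pvTuples dn 0 = [List.replicate dn (0 : Int)] := by
  rw [pvTuples.eq_def]
  simp

theorem pvTuples_succ2 (m : Nat) (k : Int) (hk : k ≠ 0) :
    pvTuples (m+2) k = (PySem.List.pyRange k (-1) (-1)).flatMap
        (fun i => (pvTuples (m+1) (k-i)).map (fun rest => i :: rest)) := by
  rw [pvTuples.eq_def, if_neg hk]

theorem pvInvEqual_zero (dn : Nat) (h : 1 ≤ dn) :
    pvInvEqual dn 0 = [List.replicate dn (0 : Int)] := by
  match dn, h with
  | 1, _ => rfl
  | (n+2), _ =>
    rw [pvInvEqual]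
    simp [List.map_const']

theorem range_sub_perm (n : Nat) : ((List.range (n+1)).map (fun j => n - j)).Perm (List.range (n+1)) := by
  have h : (List.range (n+1)).map (fun j => n - j) = (List.range (n+1)).reverse := by
    apply List.ext_getElem <;> simp
  rw [h]; exact (List.range (n+1)).reverse_perm

theorem perm_invEqual_tuples (dn kn : Nat) (h : 1 ≤ dn) :
    ((pvInvEqual dn kn).map List.reverse).Perm (pvTuples dn (kn : Int)) := by
  induction dn generalizing kn with
  | zero => omega
  | succ n ih =>
    match n, ih with
    | 0, _ =>
      show ((pvInvEqual 1 kn).map List.reverse).Perm (pvTuples 1 (kn : Int))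
      by_cases h : (kn : Int) = 0 <;> simp [pvInvEqual, pvTuples.eq_def, h]
    | (n+1), ih =>
      show ((pvInvEqual (n+2) kn).map List.reverse).Perm (pvTuples (n+2) (kn : Int))
      rcases Nat.eq_zero_or_pos kn with hk | hk
      · subst hk
        rw [pvInvEqual_zero (n+2) (by omega)]
        simp only [Nat.cast_zero]
        rw [pvTuples_zero (n+2)]
        simp
      · rw [pvInvEqual, if_neg (by omega), pvTuples_succ2 n (kn : Int) (by omega), pyRange_desc kn,
            PySem.List.foldl_append_eq_flatMap, List.nil_append, List.map_flatMap,
            List.flatMap_map]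
        -- canonical middle: H j = ↑j-headed block with inner sum kn - j
        refine List.Perm.trans
          (l₂ := (List.range (kn+1)).flatMap
                   (fun j => (pvTuples (n+1) ((kn - j : Nat) : Int)).map
                               (fun rest => (j : Int) :: rest)))
          ?_ ?_
        · refine List.Perm.flatMap (List.Perm.refl _) (fun j hj => ?_)
          rw [List.map_map]
          have := (ih (kn - j) (by omega)).map (fun rest => (j : Int) :: rest)
          rw [List.map_map] at this
          refine List.Perm.trans (List.Perm.of_eq (List.map_congr_left ?_)) this
          intro b _
          simp [Function.comp, List.reverse_append]
        · have hre : (List.range (kn+1)).flatMap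
              (fun a : Nat => (pvTuples (n+1) ((kn : Int) - ((kn : Int) - (a : Int)))).map
                          (fun rest => ((kn : Int) - (a : Int)) :: rest))
              = ((List.range (kn+1)).map (fun j => kn - j)).flatMap
                   (fun j : Nat => (pvTuples (n+1) ((kn - j : Nat) : Int)).map
                               (fun rest => (j : Int) :: rest)) := by
            rw [List.flatMap_map]
            apply List.flatMap_congr
            intro j hj
            simp only [List.mem_range] at hj
            have h1 : ((kn - (kn - j) : Nat) : Int) = (kn : Int) - ((kn : Int) - (j : Int)) := by omega
            have h2 : ((kn - j : Nat) : Int) = (kn : Int) - (j : Int) := by omega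
            rw [h2, h1]
          rw [hre]
          exact (List.Perm.flatMap (range_sub_perm kn) (fun a _ => List.Perm.refl _)).symm

theorem pvTuples_pairwise (dn : Nat) (k : Int) :
    (pvTuples dn k).Pairwise (fun a b => b < a) := by
  induction dn generalizing k with
  | zero => rw [pvTuples.eq_def]; split <;> simp
  | succ n ih =>
    match n, ih with
    | 0, _ => rw [pvTuples.eq_def]; split <;> simp
    | (n+1), ih =>
      by_cases hk0 : k = 0
      · rw [hk0, pvTuples_zero]
        simp
      · rw [pvTuples_succ2 n k hk0, List.pairwise_flatMap]
        constructor
        · intro i _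
          rw [List.pairwise_map]
          exact (ih (k - i)).imp (fun {a b} hba =>
            (List.cons_lt_cons_iff).2 (Or.inr ⟨rfl, hba⟩))
        · by_cases hk : 0 ≤ k
          · obtain ⟨kn, rfl⟩ : ∃ kn : Nat, k = (kn : Int) := ⟨k.toNat, (Int.toNat_of_nonneg hk).symm⟩
            rw [pyRange_desc, List.pairwise_map]
            refine List.pairwise_lt_range.imp ?_
            intro a b hab x hx y hy
            simp only [List.mem_map] at hx hy
            obtain ⟨rx, _, rfl⟩ := hx
            obtain ⟨ry, _, rfl⟩ := hy
            exact (List.cons_lt_cons_iff).2 (Or.inl (by omega))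
          · have hnil : PySem.List.pyRange k (-1) (-1) = [] := by
              rw [PySem.List.pyRange]
              rw [if_neg (by norm_num), if_neg (by norm_num), if_neg (by omega)]
              simp
            simp [hnil]

theorem sorted_block (dn kn : Nat) (h : 1 ≤ dn) :
    (PySem.List.sorted ((pvInvEqual dn kn).map List.reverse) (fun x => x)).reverse
      = pvTuples dn (kn : Int) := by
  have hperm : ((pvTuples dn (kn : Int)).reverse).Perm ((pvInvEqual dn kn).map List.reverse) :=
    ((pvTuples dn (kn : Int)).reverse_perm).trans (perm_invEqual_tuples dn kn h).symm
  have hpw : ((pvTuples dn (kn : Int)).reverse).Pairwise (fun a b => a < b) :=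
    (List.pairwise_reverse).2 (pvTuples_pairwise dn (kn : Int))
  have heq := PySem.List.sorted_eq_of_perm_of_pairwise_lt
    ((pvInvEqual dn kn).map List.reverse) ((pvTuples dn (kn : Int)).reverse)
    (fun x => x) hperm hpw
  have hinst : @PySem.List.sorted (List ℤ) (List ℤ) List.instLT (fun a b => a.decidableLT b)
      = @PySem.List.sorted (List ℤ) (List ℤ) List.instLinearOrder.toLT LinearOrder.toDecidableLT := by
    congr 1
    funext a b
    exact Subsingleton.elim _ _
  rw [hinst]
  exact (congrArg List.reverse heq).trans (List.reverse_reverse _)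

-- ===== VERDICT (by name: the statement is the Claim_ definition above) =====
theorem less_order_m_py_spec : Claim_equal_less_order_m_py := by
  intro d m _ hpre
  unfold Spec_less_order_m_py less_order_m_py less_order_m_py_alt
  rw [PySem.List.foldl_append_singleton_eq_map, List.nil_append]
  apply List.map_congr_left
  intro k hk
  have hk0 : 0 ≤ k := by
    rw [PySem.List.pyRange_of_pos 0 (m+1) (by omega)] at hk
    simp only [List.mem_map, List.mem_range] at hk
    obtain ⟨j, _, rfl⟩ := hk
    omega
  have hd : 1 ≤ d := by
    rcases hpre with h | h
    · exfalso
      have : PySem.List.pyRange 0 (m+1) 1 = [] := by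
        rw [PySem.List.pyRange_of_pos 0 (m+1) (by omega), if_neg (by omega)]
        simp
      rw [this] at hk
      exact absurd hk (List.not_mem_nil)
    · exact h
  have hkn : ((k.toNat : Nat) : Int) = k := Int.toNat_of_nonneg hk0
  rw [← hkn]
  exact sorted_block d.toNat k.toNat (by omega)
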